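-- pv_equiv track=rewrite | github.com/seongwonjung/Jungle_Algorithm | Baekjoon/2628_silver5.py | slice_paper
-- ===== SOURCE A (Python) =====
-- def slice_paper(cut):
--     pre = 0
--     max_len = 0
--     length = len(cut)
--     for i in range(length):
--         if(cut[i]):
--             l = i-pre
--             if(max_len < l): max_len = l
--             pre = i
--         if(i == length-1):
--             if(max_len < length-pre): max_len = length-pre
--     return max_len
-- ===== SOURCE B (Python) =====
-- def slice_paper(cut):
--     # Encode the array as a 0/1 string and split on the cut marks: the answer is the
--     # leading zero-run length vs (zero-run length + 1) for every later run.
--     s = ''.join('1' if c else '0' for c in cut)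
--     parts = s.split('1')
--     if len(parts) == 1:
--         return len(parts[0])
--     return max(len(parts[0]), max(len(p) + 1 for p in parts[1:]))
-- ===== Notes on version B (the rewrite author's own statement) =====
-- stated objective: alternative
-- what changed: A's index-by-index scan tracking the previous cut index is replaced by encoding the array as a 0/1 string, splitting it on the cut marks, and taking the max over the pieces' lengths (the leading piece as is, every later piece's length plus one).
import Mathlib
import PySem

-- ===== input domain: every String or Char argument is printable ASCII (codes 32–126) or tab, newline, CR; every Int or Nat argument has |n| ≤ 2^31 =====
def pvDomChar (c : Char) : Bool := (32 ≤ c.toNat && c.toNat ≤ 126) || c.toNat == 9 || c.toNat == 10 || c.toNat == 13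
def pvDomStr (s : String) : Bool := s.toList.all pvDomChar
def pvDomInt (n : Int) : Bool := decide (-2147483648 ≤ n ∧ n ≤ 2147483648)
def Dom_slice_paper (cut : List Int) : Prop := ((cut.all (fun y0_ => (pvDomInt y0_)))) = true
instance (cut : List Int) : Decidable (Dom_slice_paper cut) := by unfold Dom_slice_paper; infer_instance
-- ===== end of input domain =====

-- B replaces A's index scan (running `pre` index and inline last-index branch) by encoding the
-- array as a 0/1 string, splitting it on the cut marks, and taking the max over the pieces'
-- lengths (leading piece as is, every later piece length + 1) (objective: alternative).

-- ===== PORT A =====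
-- the loop body of A, named so the proofs can speak about it; `cut` and `length` are the
-- enclosing locals, `s = (pre, max_len)`, `i` the loop index
def sliceBodyA (cut : List Int) (s : Int × Int) (i : Int) : Int × Int :=
  let length : Int := cut.length
  let s1 :=
    if PySem.List.pyGetD cut i 0 ≠ 0 then
      let l := i - s.1
      (i, if s.2 < l then l else s.2)
    else s
  if i = length - 1 then
    (s1.1, if s1.2 < length - s1.1 then length - s1.1 else s1.2)
  else s1

def slice_paper (cut : List Int) : Int :=
  let length : Int := cut.length
  ((PySem.List.pyRange 0 length 1).foldl (sliceBodyA cut) ((0 : Int), (0 : Int))).2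

-- ===== PORT B =====
-- '1' if c else '0'
def sliceEnc (c : Int) : Char := if c ≠ 0 then '1' else '0'

def slice_paper_alt (cut : List Int) : Int :=
  let s : List Char := cut.map sliceEnc           -- ''.join('1' if c else '0' for c in cut)
  let parts : List (List Char) := s.splitOn '1'   -- s.split('1'): single-char separator, Lean's List.splitOn is exact here
  match parts with
  | [] => 0                                       -- unreachable: split always yields at least one part
  | p0 :: rest =>
    match rest.map (fun p => ((p.length : Int) + 1)) with
    | [] => (p0.length : Int)                     -- len(parts) == 1
    | e :: es => max (p0.length : Int) (es.foldl max e)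

-- ===== PRECONDITION & SPEC =====
def Spec_slice_paper (cut : List Int) (out : Int) : Prop := out = slice_paper_alt cut
instance (cut : List Int) (out : Int) : Decidable (Spec_slice_paper cut out) := by unfold Spec_slice_paper; infer_instance

-- ===== CLAIM (what is proved, stated in full; the proofs are below) =====
def Claim_equal_slice_paper : Prop := ∀ (cut : List Int), Dom_slice_paper cut → Spec_slice_paper cut (slice_paper cut)

-- ===== LEMMAS AND PROOFS =====

-- common yardstick: G pre k xs = max gap between consecutive cut positions of xs (offset k),
-- from previous boundary `pre` up to the end boundary k + |xs|
def sliceG (pre k : Int) : List Int → Int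
  | [] => k - pre
  | c :: xs => if c ≠ 0 then max (k - pre) (sliceG k (k + 1) xs) else sliceG pre (k + 1) xs

-- the same yardstick driven only by the distance d = k - pre (shift invariance made explicit)
def sliceGap (d : Int) : List Int → Int
  | [] => d
  | c :: xs => if c ≠ 0 then max d (sliceGap 1 xs) else sliceGap (d + 1) xs

-- the state evolution of A's loop, only the `if cut[i]` branch (the last-index branch factored out)
def sliceLoop (pre m k : Int) : List Int → Int × Int
  | [] => (pre, m)
  | c :: xs =>
      if c ≠ 0 then sliceLoop k (if m < k - pre then k - pre else m) (k + 1) xs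
      else sliceLoop pre m (k + 1) xs

theorem sliceG_nonneg (xs : List Int) : ∀ (pre k : Int), pre ≤ k → 0 ≤ sliceG pre k xs := by
  induction xs with
  | nil => intro pre k h; simp only [sliceG]; omega
  | cons c xs ih =>
      intro pre k h
      simp only [sliceG]
      split_ifs with hc
      · have := ih k (k + 1) (by omega); omega
      · exact ih pre (k + 1) (by omega)

theorem sliceG_eq_gap (xs : List Int) : ∀ (pre k : Int), sliceG pre k xs = sliceGap (k - pre) xs := by
  induction xs with
  | nil => intro pre k; simp [sliceG, sliceGap]
  | cons c xs ih =>
      intro pre k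
      simp only [sliceG, sliceGap]
      split_ifs with hc
      · have h1 := ih k (k + 1)
        rw [show k + 1 - k = (1 : Int) by ring] at h1
        rw [h1]
      · have h2 := ih pre (k + 1)
        rw [show k + 1 - pre = k - pre + 1 by ring] at h2
        exact h2

theorem sliceLoop_max (xs : List Int) : ∀ (pre m k : Int),
    max (sliceLoop pre m k xs).2 ((k + xs.length) - (sliceLoop pre m k xs).1)
      = max m (sliceG pre k xs) := by
  induction xs with
  | nil => intro pre m k; simp [sliceLoop, sliceG]
  | cons c xs ih =>
      intro pre m k
      by_cases hc : c ≠ 0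
      · simp only [sliceLoop, sliceG, if_pos hc, List.length_cons]
        have h2 : (if m < k - pre then k - pre else m) = max m (k - pre) := by
          split_ifs <;> omega
        rw [h2]
        have h1 := ih k (max m (k - pre)) (k + 1)
        push_cast at h1 ⊢
        rw [show (k + (↑xs.length + 1) : Int) = (k + 1) + ↑xs.length by ring, h1, max_assoc]
      · simp only [sliceLoop, sliceG, if_neg hc, List.length_cons]
        have h1 := ih pre m (k + 1)
        push_cast at h1 ⊢
        rw [show (k + (↑xs.length + 1) : Int) = (k + 1) + ↑xs.length by ring, h1]

-- A's foldl over range(len), for a nonempty suffix xs of cut starting at index pref.length,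
-- is sliceLoop followed by the final-index max against length - pre
theorem sliceA_fold (xs : List Int) : ∀ (pref cut : List Int) (s : Int × Int),
    cut = pref ++ xs → xs ≠ [] →
    (PySem.List.pyRange (pref.length : Int) (cut.length : Int) 1).foldl (sliceBodyA cut) s
      = ((sliceLoop s.1 s.2 (pref.length : Int) xs).1,
         max (sliceLoop s.1 s.2 (pref.length : Int) xs).2
             ((cut.length : Int) - (sliceLoop s.1 s.2 (pref.length : Int) xs).1)) := by
  induction xs with
  | nil => intro _ _ _ _ h; exact absurd rfl h
  | cons c xs ih =>
      intro pref cut s hcut _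
      have hlen : cut.length = pref.length + xs.length + 1 := by
        subst hcut; simp; omega
      have hlt : (pref.length : Int) < (cut.length : Int) := by
        rw [hlen]; push_cast; omega
      rw [PySem.List.pyRange_one_cons hlt]
      have hget : PySem.List.pyGetD cut (pref.length : Int) 0 = c := by
        subst hcut
        rw [PySem.List.pyGetD_natCast]
        simp [List.getD]
      rcases List.eq_nil_or_concat' xs with hxs | ⟨ys, y, hxs⟩
      · -- xs = []: this is the last index; the remaining range is empty
        subst hxs
        have hlen1 : cut.length = pref.length + 1 := by simpa using hlen
        have hrange : PySem.List.pyRange ((pref.length : Int) + 1) (cut.length : Int) 1 = [] := by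
          apply PySem.List.pyRange_one_eq_nil
          rw [hlen1]; push_cast; omega
        have hlast : (pref.length : Int) = (cut.length : Int) - 1 := by
          rw [hlen1]; push_cast; ring
        rw [List.foldl_cons, hrange, List.foldl_nil]
        simp only [sliceBodyA, sliceLoop, hget, if_pos hlast]
        rw [Prod.ext_iff]
        constructor
        · split_ifs <;> rfl
        · simp only [max_def]
          split_ifs <;> omega
      · -- xs ≠ []: not the last index, the second branch is a no-op
        have hxs_ne : xs ≠ [] := by subst hxs; simp
        have hnotlast : ¬ ((pref.length : Int) = (cut.length : Int) - 1) := by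
          rw [hlen]
          have : xs.length ≠ 0 := by simpa using hxs_ne
          push_cast; omega
        have hbody : sliceBodyA cut s (pref.length : Int)
            = (if c ≠ 0 then
                ((pref.length : Int),
                 if s.2 < (pref.length : Int) - s.1 then (pref.length : Int) - s.1 else s.2)
               else s) := by
          simp only [sliceBodyA, hget, if_neg hnotlast]
        have hcut' : cut = (pref ++ [c]) ++ xs := by simp [hcut]
        have hpref : ((pref ++ [c]).length : Int) = (pref.length : Int) + 1 := by
          simp
        have hih := ih (pref ++ [c]) cut (sliceBodyA cut s (pref.length : Int)) hcut' hxs_ne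
        rw [hpref] at hih
        rw [List.foldl_cons, hih, hbody]
        simp only [sliceLoop]
        split_ifs <;> rfl

theorem sliceA_char (cut : List Int) :
    slice_paper cut = max 0 (sliceG 0 0 cut) := by
  rcases List.eq_nil_or_concat' cut with rfl | ⟨ys, y, h⟩
  · simp [slice_paper, sliceG, PySem.List.pyRange]
  · have hne : cut ≠ [] := by rw [h]; simp
    have hfold := sliceA_fold cut [] cut ((0 : Int), (0 : Int)) (by simp) hne
    simp only [List.length_nil, Nat.cast_zero] at hfold
    have hmax := sliceLoop_max cut 0 0 0
    simp only [zero_add] at hmax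
    simp only [slice_paper, hfold, hmax]

-- folding max from a larger seed
theorem sliceFoldlMax (l : List Int) : ∀ (a b : Int),
    l.foldl max (max a b) = max a (l.foldl max b) := by
  induction l with
  | nil => intro a b; simp
  | cons e es ih =>
      intro a b
      simp only [List.foldl_cons]
      rw [max_assoc, ih]

-- B's value as a function of the part list, the leading piece's length shifted by d
def sliceBVal (d : Int) : List (List Char) → Int
  | [] => 0
  | [p0] => d + (p0.length : Int)
  | p0 :: r :: rs => max (d + (p0.length : Int))
      ((rs.map (fun p => ((p.length : Int) + 1))).foldl max ((r.length : Int) + 1))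

-- B's split of the encoded string is the gap yardstick
theorem sliceB_split (xs : List Int) : ∀ (d : Int),
    sliceBVal d ((xs.map sliceEnc).splitOnP (· == '1')) = sliceGap d xs := by
  induction xs with
  | nil => intro d; simp [List.splitOnP_nil, sliceBVal, sliceGap]
  | cons c xs ih =>
      intro d
      rw [List.map_cons, List.splitOnP_cons]
      cases hp : (xs.map sliceEnc).splitOnP (· == '1') with
      | nil => exact absurd hp (List.splitOnP_ne_nil _ _)
      | cons q0 qrest =>
          by_cases hc : c ≠ 0
          · have henc : ((sliceEnc c == '1') : Bool) = true := by
              simp [sliceEnc, if_pos hc]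
            rw [if_pos henc]
            simp only [sliceGap, if_pos hc]
            rw [← ih 1, hp]
            cases qrest with
            | nil =>
                simp only [sliceBVal, List.map_nil, List.foldl_nil, List.length_nil,
                  Nat.cast_zero, add_zero]
                ring_nf
            | cons r rs =>
                simp only [sliceBVal, List.map_cons, List.foldl_cons, List.length_nil,
                  Nat.cast_zero, add_zero]
                rw [show max ((q0.length : Int) + 1) ((r.length : Int) + 1)
                      = max (1 + (q0.length : Int)) ((r.length : Int) + 1) by ring_nf]
                rw [sliceFoldlMax]
          · have henc : ((sliceEnc c == '1') : Bool) = false := by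
              simp [sliceEnc, if_neg hc]
            rw [if_neg (by simp [henc])]
            simp only [sliceGap, if_neg hc]
            rw [← ih (d + 1), hp, List.modifyHead_cons]
            cases qrest with
            | nil =>
                simp only [sliceBVal, List.length_cons]
                push_cast; ring_nf
            | cons r rs =>
                simp only [sliceBVal, List.length_cons]
                push_cast; ring_nf

theorem sliceB_alt (cut : List Int) : slice_paper_alt cut = sliceGap 0 cut := by
  rw [← sliceB_split cut 0]
  simp only [slice_paper_alt, List.splitOn]
  cases hp : (cut.map sliceEnc).splitOnP (· == '1') with
  | nil => exact absurd hp (List.splitOnP_ne_nil _ _)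
  | cons q0 qrest =>
      cases qrest with
      | nil => simp [sliceBVal]
      | cons r rs => simp [sliceBVal]

-- ===== VERDICT (by name: the statement is the Claim_ definition above) =====
theorem slice_paper_spec : Claim_equal_slice_paper := by
  intro cut _
  unfold Spec_slice_paper
  have h0 : sliceG 0 0 cut = sliceGap 0 cut := by simpa using sliceG_eq_gap cut 0 0
  rw [sliceA_char, sliceB_alt, ← h0, max_eq_right (sliceG_nonneg cut 0 0 le_rfl)]
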